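-- pv_equiv track=rewrite | github.com/fabriziosalmi/wildbox | open-security-api/app/tools/threat_intelligence_aggregator/main.py | _classify_threat
-- ===== SOURCE A (Python) =====
-- from typing import Dict, List, Optional
--
-- def _classify_threat(threat_types: List[str], malware_families: List[str]) -> str:
--     """Classify threat based on types and families"""
--     if "ransomware" in threat_types:
--         return "Ransomware"
--     elif "apt" in threat_types:
--         return "Advanced Persistent Threat"
--     elif "trojan" in threat_types or "malware" in threat_types:
--         return "Malware"
--     elif "botnet" in threat_types:
--         return "Botnet"
--     elif "phishing" in threat_types:
--         return "Phishing"
--     elif "c2" in threat_types: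
--         return "Command & Control"
--     elif any(t in threat_types for t in ["suspicious", "exploit_kit"]):
--         return "Suspicious Activity"
--     else:
--         return "Unknown"
-- ===== SOURCE B (Python) =====
-- # Single pass over the input list with a min-priority accumulator, instead of
-- # testing each rule against the whole list.
-- _PRIORITY = {
--     "ransomware": (0, "Ransomware"),
--     "apt": (1, "Advanced Persistent Threat"),
--     "trojan": (2, "Malware"),
--     "malware": (2, "Malware"),
--     "botnet": (3, "Botnet"),
--     "phishing": (4, "Phishing"),
--     "c2": (5, "Command & Control"),
--     "suspicious": (6, "Suspicious Activity"),
--     "exploit_kit": (6, "Suspicious Activity"),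
-- }
--
-- def _classify_threat(threat_types, malware_families):
--     best = None
--     for t in threat_types:
--         entry = _PRIORITY.get(t)
--         if entry is not None and (best is None or entry[0] < best[0]):
--             best = entry
--     return best[1] if best is not None else "Unknown"
-- ===== Notes on version B (the rewrite author's own statement) =====
-- stated objective: alternative
-- what changed: Instead of testing each category's keywords against the whole list (the if/elif cascade), B makes one pass over threat_types keeping the minimum-priority recognized keyword in an accumulator, with priorities taken from a keyword->(priority,category) dict; the minimum-priority keyword present is exactly the first cascade branch that fires.
import Mathlib
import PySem

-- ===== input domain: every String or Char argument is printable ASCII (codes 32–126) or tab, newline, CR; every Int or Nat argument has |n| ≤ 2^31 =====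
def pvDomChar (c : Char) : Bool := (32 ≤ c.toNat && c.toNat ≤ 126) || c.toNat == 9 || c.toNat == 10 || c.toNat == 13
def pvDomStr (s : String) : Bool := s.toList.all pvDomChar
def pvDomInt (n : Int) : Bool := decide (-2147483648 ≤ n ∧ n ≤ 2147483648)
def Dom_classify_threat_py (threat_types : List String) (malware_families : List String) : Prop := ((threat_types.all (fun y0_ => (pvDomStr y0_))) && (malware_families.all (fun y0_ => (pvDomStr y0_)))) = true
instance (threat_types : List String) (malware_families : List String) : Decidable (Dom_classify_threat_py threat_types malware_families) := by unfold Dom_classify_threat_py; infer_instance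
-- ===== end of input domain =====

-- B replaces A's if/elif cascade over fixed keywords by one pass over threat_types keeping the min-priority recognized keyword (objective: alternative); same return value everywhere.


-- ===== PORT A =====
-- Port of A: the if/elif cascade, branch for branch.
def classify_threat_py (threat_types : List String) (malware_families : List String) : String :=
  if threat_types.contains "ransomware" then "Ransomware"
  else if threat_types.contains "apt" then "Advanced Persistent Threat"
  else if threat_types.contains "trojan" || threat_types.contains "malware" then "Malware"
  else if threat_types.contains "botnet" then "Botnet"
  else if threat_types.contains "phishing" then "Phishing"
  else if threat_types.contains "c2" then "Command & Control"
  else if (["suspicious", "exploit_kit"] : List String).any (fun t => threat_types.contains t) then "Suspicious Activity"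
  else "Unknown"

-- ===== PORT B =====
-- Port of B: the keyword -> (priority, category) dict _PRIORITY.
def pvPriority : PySem.Dict String (Int × String) := PySem.Dict.ofList
  [("ransomware", (0, "Ransomware")),
   ("apt", (1, "Advanced Persistent Threat")),
   ("trojan", (2, "Malware")),
   ("malware", (2, "Malware")),
   ("botnet", (3, "Botnet")),
   ("phishing", (4, "Phishing")),
   ("c2", (5, "Command & Control")),
   ("suspicious", (6, "Suspicious Activity")),
   ("exploit_kit", (6, "Suspicious Activity"))]

-- the loop body: 'entry = _PRIORITY.get(t); if entry is not None and (best is None or entry[0] < best[0]): best = entry'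
def pvStep (best : Option (Int × String)) (t : String) : Option (Int × String) :=
  match PySem.Dict.get? pvPriority t with
  | none => best
  | some e =>
      match best with
      | none => some e
      | some b => if e.1 < b.1 then some e else some b

def classify_threat_py_alt (threat_types : List String) (malware_families : List String) : String :=
  match threat_types.foldl pvStep none with
  | some b => b.2
  | none => "Unknown"

-- ===== PRECONDITION & SPEC =====
def Spec_classify_threat_py (threat_types : List String) (malware_families : List String) (out : String) : Prop := out = classify_threat_py_alt threat_types malware_families
instance (threat_types : List String) (malware_families : List String) (out : String) : Decidable (Spec_classify_threat_py threat_types malware_families out) := by unfold Spec_classify_threat_py; infer_instance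

-- ===== CLAIM (what is proved, stated in full; the proofs are below) =====
def Claim_equal_classify_threat_py : Prop := ∀ (threat_types : List String) (malware_families : List String), Dom_classify_threat_py threat_types malware_families → Spec_classify_threat_py threat_types malware_families (classify_threat_py threat_types malware_families)

-- ===== LEMMAS AND PROOFS =====

-- the (priority, category) of the first cascade branch that fires, none if no keyword is present
def pvCascade (tts : List String) : Option (Int × String) :=
  if tts.contains "ransomware" then some (0, "Ransomware")
  else if tts.contains "apt" then some (1, "Advanced Persistent Threat")
  else if tts.contains "trojan" || tts.contains "malware" then some (2, "Malware")
  else if tts.contains "botnet" then some (3, "Botnet")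
  else if tts.contains "phishing" then some (4, "Phishing")
  else if tts.contains "c2" then some (5, "Command & Control")
  else if tts.contains "suspicious" || tts.contains "exploit_kit" then some (6, "Suspicious Activity")
  else none

-- min of two option-entries (none = nothing seen), left argument preferred on equal priorities
def pvMerge (x y : Option (Int × String)) : Option (Int × String) :=
  match x, y with
  | none, y => y
  | some e, none => some e
  | some e, some c => if e.1 ≤ c.1 then some e else some c

-- pvStep's combine, with the looked-up entry as an explicit argument (strict <, ties keep best)
def pvMergeS (best x : Option (Int × String)) : Option (Int × String) :=
  match x with
  | none => best
  | some e =>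
      match best with
      | none => some e
      | some b => if e.1 < b.1 then some e else some b

lemma pvStep_eq (best : Option (Int × String)) (t : String) :
    pvStep best t = pvMergeS best (PySem.Dict.get? pvPriority t) := rfl

-- both merges prefer the earlier-seen side on ties, so absorbing one element associates
lemma pvMerge_assoc (best x y : Option (Int × String)) :
    pvMerge (pvMergeS best x) y = pvMerge best (pvMerge x y) := by
  rcases best with _ | b <;> rcases x with _ | e <;> rcases y with _ | c <;> try rfl
  · by_cases h1 : e.1 < b.1 <;> simp only [pvMerge, pvMergeS, if_pos, if_neg, h1, if_true, if_false, ite_true, ite_false] <;>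
      split_ifs <;> first | rfl | (exfalso; omega)
  · by_cases h1 : e.1 < b.1 <;> by_cases h2 : e.1 ≤ c.1 <;>
      simp only [pvMerge, pvMergeS, h1, h2, if_true, if_false, ite_true, ite_false] <;>
      split_ifs <;> first | rfl | (exfalso; omega)

lemma pvGet_eq (t : String) : PySem.Dict.get? pvPriority t =
    (if "ransomware" == t then some (0, "Ransomware") else if "apt" == t then some (1, "Advanced Persistent Threat") else if "trojan" == t then some (2, "Malware") else if "malware" == t then some (2, "Malware") else if "botnet" == t then some (3, "Botnet") else if "phishing" == t then some (4, "Phishing") else if "c2" == t then some (5, "Command & Control") else if "suspicious" == t then some (6, "Suspicious Activity") else if "exploit_kit" == t then some (6, "Suspicious Activity") else none) := by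
  show PySem.Dict.get? (PySem.Dict.mk [("ransomware", ((0:Int), "Ransomware")), ("apt", ((1:Int), "Advanced Persistent Threat")), ("trojan", ((2:Int), "Malware")), ("malware", ((2:Int), "Malware")), ("botnet", ((3:Int), "Botnet")), ("phishing", ((4:Int), "Phishing")), ("c2", ((5:Int), "Command & Control")), ("suspicious", ((6:Int), "Suspicious Activity")), ("exploit_kit", ((6:Int), "Suspicious Activity"))]) t = _
  simp only [PySem.Dict.get?_mk_cons]
  rfl

set_option maxHeartbeats 2000000 in
lemma pvCascade_cons (t : String) (r : List String) :
    pvCascade (t :: r) = pvMerge (PySem.Dict.get? pvPriority t) (pvCascade r) := by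
  rcases eq_or_ne t "ransomware" with h | h1
  · subst h
    rw [show PySem.Dict.get? pvPriority "ransomware" = some ((0:Int), "Ransomware") from rfl]
    simp only [pvCascade, pvMerge, List.contains_cons]
    norm_num
    first
    | rfl
    | (split_ifs <;> first | rfl | tauto)
  rcases eq_or_ne t "apt" with h | h2
  · subst h
    rw [show PySem.Dict.get? pvPriority "apt" = some ((1:Int), "Advanced Persistent Threat") from rfl]
    simp only [pvCascade, pvMerge, List.contains_cons]
    norm_num
    first
    | rfl
    | (split_ifs <;> first | rfl | tauto)
  rcases eq_or_ne t "trojan" with h | h3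
  · subst h
    rw [show PySem.Dict.get? pvPriority "trojan" = some ((2:Int), "Malware") from rfl]
    simp only [pvCascade, pvMerge, List.contains_cons]
    norm_num
    first
    | rfl
    | (split_ifs <;> first | rfl | tauto)
  rcases eq_or_ne t "malware" with h | h4
  · subst h
    rw [show PySem.Dict.get? pvPriority "malware" = some ((2:Int), "Malware") from rfl]
    simp only [pvCascade, pvMerge, List.contains_cons]
    norm_num
    first
    | rfl
    | (split_ifs <;> first | rfl | tauto)
  rcases eq_or_ne t "botnet" with h | h5
  · subst h
    rw [show PySem.Dict.get? pvPriority "botnet" = some ((3:Int), "Botnet") from rfl]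
    simp only [pvCascade, pvMerge, List.contains_cons]
    norm_num
    first
    | rfl
    | (split_ifs <;> first | rfl | tauto)
  rcases eq_or_ne t "phishing" with h | h6
  · subst h
    rw [show PySem.Dict.get? pvPriority "phishing" = some ((4:Int), "Phishing") from rfl]
    simp only [pvCascade, pvMerge, List.contains_cons]
    norm_num
    first
    | rfl
    | (split_ifs <;> first | rfl | tauto)
  rcases eq_or_ne t "c2" with h | h7
  · subst h
    rw [show PySem.Dict.get? pvPriority "c2" = some ((5:Int), "Command & Control") from rfl]
    simp only [pvCascade, pvMerge, List.contains_cons]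
    norm_num
    first
    | rfl
    | (split_ifs <;> first | rfl | tauto)
  rcases eq_or_ne t "suspicious" with h | h8
  · subst h
    rw [show PySem.Dict.get? pvPriority "suspicious" = some ((6:Int), "Suspicious Activity") from rfl]
    simp only [pvCascade, pvMerge, List.contains_cons]
    norm_num
    first
    | rfl
    | (split_ifs <;> first | rfl | tauto)
  rcases eq_or_ne t "exploit_kit" with h | h9
  · subst h
    rw [show PySem.Dict.get? pvPriority "exploit_kit" = some ((6:Int), "Suspicious Activity") from rfl]
    simp only [pvCascade, pvMerge, List.contains_cons]
    norm_num
    first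
    | rfl
    | (split_ifs <;> first | rfl | tauto)
  simp only [pvGet_eq, pvCascade, pvMerge, List.contains_cons]
  simp [beq_iff_eq, Ne.symm h1, Ne.symm h2, Ne.symm h3, Ne.symm h4, Ne.symm h5, Ne.symm h6, Ne.symm h7, Ne.symm h8, Ne.symm h9, h1, h2, h3, h4, h5, h6, h7, h8, h9]

-- the fold over the input is the merge of the accumulator with the cascade value
lemma pvFold_eq (r : List String) : ∀ best : Option (Int × String),
    r.foldl pvStep best = pvMerge best (pvCascade r) := by
  induction r with
  | nil => intro best; rcases best with _ | b <;> simp [pvCascade, pvMerge]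
  | cons t r ih =>
      intro best
      rw [List.foldl_cons, ih (pvStep best t), pvStep_eq, pvCascade_cons, pvMerge_assoc]

-- ===== VERDICT (by name: the statement is the Claim_ definition above) =====
theorem classify_threat_py_spec : Claim_equal_classify_threat_py := by
  intro tts mfs _
  unfold Spec_classify_threat_py classify_threat_py_alt
  rw [pvFold_eq tts none]
  unfold classify_threat_py pvCascade pvMerge
  simp only [List.any_cons, List.any_nil, Bool.or_false]
  split_ifs <;> rfl
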